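-- pv_equiv track=rewrite | github.com/thisis-hee/PS | 프로그래머스/2/42587. 프로세스/프로세스.py | solution
-- ===== SOURCE A (Python) =====
-- from collections import deque
--
-- def solution(priorities, location):
--     answer = 0
--     cnt=0
--     priorities=deque(priorities)
--     chk_deque=deque([x for x in range(len(priorities))])
--
--     while priorities:
--         if location not in chk_deque:
--             break
--
--         if priorities[0]!=max(priorities):
--             priorities.append(priorities.popleft())
--             chk_deque.append(chk_deque.popleft())
--         else:
--             cnt+=1
--             priorities.popleft()
--             chk_deque.popleft()
--
--     answer=cnt
--
--     return answer
-- ===== SOURCE B (Python) =====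
-- def solution(priorities, location):
--     n = len(priorities)
--     if not 0 <= location < n:
--         return 0
--     cnt = 0
--     front = 0
--     for p in sorted(set(priorities), reverse=True):
--         # this priority level is popped in cyclic index order starting at `front`
--         order = [i for i in range(front, n) if priorities[i] == p] \
--               + [i for i in range(front) if priorities[i] == p]
--         for i in order:
--             cnt += 1
--             if i == location:
--                 return cnt
--         front = order[-1] + 1
--     return cnt
-- ===== Notes on version B (the rewrite author's own statement) =====
-- stated objective: faster
-- what changed: Replaces the rotate-queue simulation that recomputes max(priorities) and a membership test on every step by a non-simulating pass: distinct priorities are processed in decreasing order and each level's indices are popped in cyclic order from a moving front pointer.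
import Mathlib
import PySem

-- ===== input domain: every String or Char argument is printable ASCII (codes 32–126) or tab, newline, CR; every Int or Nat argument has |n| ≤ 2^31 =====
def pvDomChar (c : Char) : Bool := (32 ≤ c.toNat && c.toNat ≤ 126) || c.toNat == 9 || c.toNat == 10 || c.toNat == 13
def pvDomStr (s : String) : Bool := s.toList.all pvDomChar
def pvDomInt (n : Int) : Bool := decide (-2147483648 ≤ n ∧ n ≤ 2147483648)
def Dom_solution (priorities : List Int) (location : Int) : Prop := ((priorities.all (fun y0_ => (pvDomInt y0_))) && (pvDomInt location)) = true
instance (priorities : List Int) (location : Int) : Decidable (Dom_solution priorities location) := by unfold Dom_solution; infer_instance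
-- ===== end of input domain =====

-- B replaces A's rotate-queue simulation (which recomputes the max each step) by one pass over the
-- distinct priorities in decreasing order, popping each level's indices cyclically from a moving front.

-- ===== PORT A =====

-- max(priorities)  (call sites only ever pass a nonempty list)
def pyMax (l : List Int) : Int := (PySem.List.max? l (fun x => x)).getD 0

-- termination measure helper for the while loop: index of the first maximal element
def rotNum (l : List Int) : Nat := l.findIdx (fun x => x == pyMax l)

theorem pyMax_spec (l : List Int) (h : l ≠ []) : pyMax l ∈ l ∧ ∀ y ∈ l, y ≤ pyMax l := by
  cases hm : PySem.List.max? l (fun x => x) with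
  | none => exact absurd ((PySem.List.max?_eq_none_iff l (fun x => x)).mp hm) h
  | some m =>
    have hp : pyMax l = m := by simp [pyMax, hm]
    rw [hp]
    exact ⟨PySem.List.max?_mem hm, fun y hy => PySem.List.max?_isMax hm y hy⟩

theorem pyMax_eq (l : List Int) (m : Int) (h1 : m ∈ l) (h2 : ∀ y ∈ l, y ≤ m) : pyMax l = m := by
  have hne : l ≠ [] := List.ne_nil_of_mem h1
  exact le_antisymm (h2 _ (pyMax_spec l hne).1) ((pyMax_spec l hne).2 m h1)

-- cited by solGo's decreasing_by: a rotation strictly decreases the distance to the first max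
theorem rotNum_lt (p : Int) (pr : List Int) (h : p ≠ pyMax (p :: pr)) :
    rotNum (pr ++ [p]) < rotNum (p :: pr) := by
  obtain ⟨hmem, hmax⟩ := pyMax_spec (p :: pr) (by simp)
  set m := pyMax (p :: pr) with hm
  have hmpr : m ∈ pr := by
    rcases List.mem_cons.mp hmem with h' | h'
    · exact absurd h'.symm h
    · exact h'
  have hperm : (pr ++ [p]).Perm (p :: pr) := List.perm_append_singleton p pr
  have hrot : pyMax (pr ++ [p]) = m := by
    apply pyMax_eq
    · exact List.mem_append_left _ hmpr
    · intro y hy; exact hmax y (hperm.mem_iff.mp hy)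
  have hlt : pr.findIdx (fun x => x == m) < pr.length :=
    List.findIdx_lt_length.mpr ⟨m, hmpr, by simp⟩
  have h1 : rotNum (pr ++ [p]) = pr.findIdx (fun x => x == m) := by
    rw [rotNum, hrot, List.findIdx_append, if_pos hlt]
  have h2 : rotNum (p :: pr) = pr.findIdx (fun x => x == m) + 1 := by
    rw [rotNum, ← hm, List.findIdx_cons]
    have : (p == m) = false := by simpa using h
    simp [this]
  omega

def solGo (ps : List Int) (chk : List Int) (location : Int) (cnt : Int) : Int :=
  match ps, chk with
  | [], _ => cnt
  | _ :: _, [] => cnt      -- unreachable from `solution`: the two deques move in lockstep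
  | p :: pr, c :: cr =>
    if location ∉ c :: cr then cnt
    else if p ≠ pyMax (p :: pr) then
      solGo (pr ++ [p]) (cr ++ [c]) location cnt
    else
      solGo pr cr location (cnt + 1)
termination_by (ps.length, rotNum ps)
decreasing_by
  · apply Prod.Lex.right' <;> simp [rotNum_lt _ _ (by assumption)]
  · apply Prod.Lex.left; simp

def solution (priorities : List Int) (location : Int) : Int :=
  solGo priorities (PySem.List.pyRange 0 (priorities.length) 1) location 0

-- ===== PORT B =====

-- inner 'for i in order: cnt += 1; if i == location: return cnt'  (.inl = early return)
def altInner (order : List Int) (location : Int) (cnt : Int) : Sum Int Int :=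
  match order with
  | [] => Sum.inr cnt
  | i :: rest => if i = location then Sum.inl (cnt + 1) else altInner rest location (cnt + 1)

-- outer 'for p in sorted(set(priorities), reverse=True)' loop
def altOuter (lvls : List Int) (priorities : List Int) (front : Int) (location : Int) (cnt : Int) : Int :=
  match lvls with
  | [] => cnt
  | p :: rest =>
    let order : List Int :=
      (PySem.List.pyRange front (priorities.length) 1).filter
          (fun i => PySem.List.pyGetD priorities i 0 == p)
      ++ (PySem.List.pyRange 0 front 1).filter
          (fun i => PySem.List.pyGetD priorities i 0 == p)
    match altInner order location cnt with
    | Sum.inl r => r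
    | Sum.inr cnt' => altOuter rest priorities ((order.getLast?.getD 0) + 1) location cnt'
        -- order[-1]: `order` is provably nonempty at every reached call, the default is never used

def solution_alt (priorities : List Int) (location : Int) : Int :=
  if 0 ≤ location ∧ location < (priorities.length : Int) then
    altOuter (PySem.List.sorted (PySem.Set.ofList priorities) (fun x => x) true) priorities 0 location 0
  else 0

-- ===== PRECONDITION & SPEC =====
def Spec_solution (priorities : List Int) (location : Int) (out : Int) : Prop := out = solution_alt priorities location
instance (priorities : List Int) (location : Int) (out : Int) : Decidable (Spec_solution priorities location out) := by unfold Spec_solution; infer_instance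

-- ===== CLAIM (what is proved, stated in full; the proofs are below) =====
def Claim_equal_solution : Prop := ∀ (priorities : List Int) (location : Int), Dom_solution priorities location → Spec_solution priorities location (solution priorities location)

-- ===== LEMMAS AND PROOFS =====

-- A's queue state as one list of (original index, priority) pairs
def simGo (q : List (Int × Int)) (location : Int) (cnt : Int) : Int :=
  match q with
  | [] => cnt
  | e :: qr =>
    if location ∉ (e :: qr).map Prod.fst then cnt
    else if e.2 ≠ pyMax ((e :: qr).map Prod.snd) then
      simGo (qr ++ [e]) location cnt
    else
      simGo qr location (cnt + 1)
termination_by ((q.map Prod.snd).length, rotNum (q.map Prod.snd))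
decreasing_by
  · apply Prod.Lex.right' <;> simp [rotNum_lt _ _ (by assumption)]
  · apply Prod.Lex.left; simp

-- one cyclic block of the canonical queue: surviving indices of [a,b) in increasing order
def blk (ps : List Int) (a b : Int) (lv : List Int) : List (Int × Int) :=
  ((PySem.List.pyRange a b 1).filter (fun i => decide (PySem.List.pyGetD ps i 0 ∈ lv))).map
    (fun i => (i, PySem.List.pyGetD ps i 0))

-- canonical queue: survivors (priority still in lv) in original cyclic order starting at f
def canonQ (ps : List Int) (f : Int) (lv : List Int) : List (Int × Int) :=
  blk ps f (ps.length) lv ++ blk ps 0 f lv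

theorem simGo_not_mem (q : List (Int × Int)) (loc cnt : Int) (h : loc ∉ q.map Prod.fst) :
    simGo q loc cnt = cnt := by
  cases q with
  | nil => rw [simGo]
  | cons e qr => rw [simGo, if_pos h]

theorem simGo_rot (e : Int × Int) (qr : List (Int × Int)) (loc cnt : Int)
    (h1 : loc ∈ (e :: qr).map Prod.fst) (h2 : e.2 ≠ pyMax ((e :: qr).map Prod.snd)) :
    simGo (e :: qr) loc cnt = simGo (qr ++ [e]) loc cnt := by
  rw [simGo, if_neg (not_not_intro h1), if_pos h2]

theorem simGo_pop (e : Int × Int) (qr : List (Int × Int)) (loc cnt : Int)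
    (h1 : loc ∈ (e :: qr).map Prod.fst) (h2 : e.2 = pyMax ((e :: qr).map Prod.snd)) :
    simGo (e :: qr) loc cnt = simGo qr loc (cnt + 1) := by
  rw [simGo, if_neg (not_not_intro h1), if_neg (not_not_intro h2)]

theorem solGo_eq_simGo (ps chk : List Int) (loc cnt : Int) (h : chk.length = ps.length) :
    solGo ps chk loc cnt = simGo (chk.zip ps) loc cnt := by
  revert h
  induction ps, chk, cnt using solGo.induct (location := loc) with
  | case1 chk cnt =>
    intro h
    simp [solGo, simGo]
  | case2 cnt p pr =>
    intro h
    simp at h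
  | case3 cnt p pr c cr hmem =>
    intro h
    have hlen : cr.length = pr.length := by simpa using h
    rw [solGo, if_pos hmem]
    rw [List.zip_cons_cons, simGo_not_mem]
    rw [List.map_cons, List.map_fst_zip (le_of_eq hlen)]
    simpa using hmem
  | case4 cnt p pr c cr hmem hmax ih =>
    intro h
    have hlen : cr.length = pr.length := by simpa using h
    have hmem' : loc ∈ c :: cr := not_not.mp hmem
    have hz : (cr ++ [c]).zip (pr ++ [p]) = cr.zip pr ++ [(c, p)] := List.zip_append hlen
    rw [solGo, if_neg hmem, if_pos hmax]
    rw [List.zip_cons_cons, simGo_rot, ← hz]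
    · exact ih (by simp [hlen])
    · simpa [List.map_fst_zip (le_of_eq hlen)] using hmem'
    · simpa [List.map_snd_zip (le_of_eq hlen.symm)] using hmax
  | case5 cnt p pr c cr hmem hmax ih =>
    intro h
    have hlen : cr.length = pr.length := by simpa using h
    have hmem' : loc ∈ c :: cr := not_not.mp hmem
    have hmax' : p = pyMax (p :: pr) := not_not.mp (by simpa using hmax)
    rw [solGo, if_neg hmem, if_neg hmax]
    rw [List.zip_cons_cons, simGo_pop]
    · exact ih hlen
    · simpa [List.map_fst_zip (le_of_eq hlen)] using hmem'
    · simpa [List.map_snd_zip (le_of_eq hlen.symm)] using hmax'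

theorem altInner_inr (order : List Int) (loc cnt c : Int)
    (h : altInner order loc cnt = Sum.inr c) : loc ∉ order := by
  induction order generalizing cnt with
  | nil => simp
  | cons i rest ih =>
    rw [altInner] at h
    by_cases hi : i = loc
    · simp [hi] at h
    · simp only [if_neg hi] at h
      simp only [List.mem_cons, not_or]
      exact ⟨fun hl => hi hl.symm, ih _ h⟩

-- the level lemma: from any queue whose maximum priority is p, the simulation pops exactly the
-- p-elements in queue order, then continues on (part after the last p) ++ (filtered part before it)
theorem level_lemma (p : Int) (u : List (Int × Int)) :
    ∀ (e : Int × Int) (v : List (Int × Int)) (loc cnt : Int),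
    e.2 = p → (∀ x ∈ v, x.2 ≠ p) → (∀ x ∈ u ++ e :: v, x.2 ≤ p) →
    ((u ++ e :: v).map Prod.fst).Nodup → loc ∈ (u ++ e :: v).map Prod.fst →
    simGo (u ++ e :: v) loc cnt =
      match altInner (((u ++ e :: v).filter (fun x => x.2 == p)).map Prod.fst) loc cnt with
      | Sum.inl r => r
      | Sum.inr c => simGo (v ++ u.filter (fun x => x.2 != p)) loc c := by
  induction u with
  | nil =>
    intro e v loc cnt he hv hmax hnd hloc
    simp only [List.nil_append] at *
    have hpmem : p ∈ (e :: v).map Prod.snd := by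
      simp only [List.map_cons, List.mem_cons]; exact Or.inl he.symm
    have hpm : pyMax ((e :: v).map Prod.snd) = p := by
      apply pyMax_eq _ _ hpmem
      intro y hy
      obtain ⟨x, hx, rfl⟩ := List.mem_map.mp hy
      exact hmax x hx
    have hfv : v.filter (fun x => x.2 == p) = [] := by
      rw [List.filter_eq_nil_iff]
      intro x hx
      simpa using hv x hx
    have hord : ((e :: v).filter (fun x => x.2 == p)).map Prod.fst = [e.1] := by
      rw [List.filter_cons_of_pos (by simpa using he), hfv]; rfl
    rw [simGo_pop e v loc cnt hloc (by rw [hpm, he]), hord]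
    by_cases hel : e.1 = loc
    · rw [altInner, if_pos hel]
      apply simGo_not_mem
      rw [← hel]
      exact (List.nodup_cons.mp (by simpa using hnd)).1
    · rw [altInner, if_neg hel, altInner]
      have : v ++ List.filter (fun x => x.2 != p) [] = v := by simp
      rw [this]
  | cons x u' ih =>
    intro e v loc cnt he hv hmax hnd hloc
    rw [List.cons_append] at *
    by_cases hx : x.2 = p
    · -- front has the max priority: pop it
      have hpmem : p ∈ ((x :: (u' ++ e :: v)).map Prod.snd) := by
        simp only [List.map_cons, List.mem_cons]; exact Or.inl hx.symm
      have hpm : pyMax ((x :: (u' ++ e :: v)).map Prod.snd) = p := by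
        apply pyMax_eq _ _ hpmem
        intro y hy
        obtain ⟨z, hz, rfl⟩ := List.mem_map.mp hy
        exact hmax z hz
      rw [simGo_pop x (u' ++ e :: v) loc cnt hloc (by rw [hpm, hx])]
      rw [List.filter_cons_of_pos (by simpa using hx), List.map_cons]
      by_cases hel : x.1 = loc
      · rw [altInner, if_pos hel]
        apply simGo_not_mem
        rw [← hel]
        exact (List.nodup_cons.mp (by simpa using hnd)).1
      · rw [altInner, if_neg hel]
        have hloc' : loc ∈ (u' ++ e :: v).map Prod.fst := by
          rw [List.map_cons] at hloc
          rcases List.mem_cons.mp hloc with h' | h'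
          · exact absurd h'.symm hel
          · exact h'
        have := ih e v loc (cnt + 1) he hv
          (fun z hz => hmax z (List.mem_cons_of_mem x hz))
          ((List.nodup_cons.mp (by simpa using hnd)).2) hloc'
        rw [this]
        have : (x :: u').filter (fun z => z.2 != p) = u'.filter (fun z => z.2 != p) := by
          rw [List.filter_cons_of_neg (by simpa using hx)]
        rw [this]
    · -- front below the max: rotate it to the back
      have hpmem : p ∈ ((x :: (u' ++ e :: v)).map Prod.snd) := by
        simp only [List.map_cons, List.map_append, List.map_cons, List.mem_cons, List.mem_append]
        right; right; left; exact he.symm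
      have hpm : pyMax ((x :: (u' ++ e :: v)).map Prod.snd) = p := by
        apply pyMax_eq _ _ hpmem
        intro y hy
        obtain ⟨z, hz, rfl⟩ := List.mem_map.mp hy
        exact hmax z hz
      rw [simGo_rot x (u' ++ e :: v) loc cnt hloc (by rw [hpm]; exact hx)]
      have hshape : (u' ++ e :: v) ++ [x] = u' ++ e :: (v ++ [x]) := by simp
      have hperm : (u' ++ e :: (v ++ [x])).Perm (x :: (u' ++ e :: v)) := by
        rw [← hshape]; exact List.perm_append_singleton x (u' ++ e :: v)
      have hpermf : ((u' ++ e :: (v ++ [x])).map Prod.fst).Perm ((x :: (u' ++ e :: v)).map Prod.fst) :=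
        hperm.map Prod.fst
      rw [hshape]
      have := ih e (v ++ [x]) loc cnt he
        (by intro z hz
            rcases List.mem_append.mp hz with h' | h'
            · exact hv z h'
            · rw [List.mem_singleton.mp h']; exact hx)
        (fun z hz => hmax z (hperm.mem_iff.mp hz))
        (hpermf.nodup_iff.mpr hnd)
        (hpermf.mem_iff.mpr hloc)
      rw [this]
      have hfilt : (u' ++ e :: (v ++ [x])).filter (fun z => z.2 == p) =
          ((x :: (u' ++ e :: v)).filter (fun z => z.2 == p)) := by
        have hxb : (x.2 == p) = false := by simpa using hx
        simp [List.filter_append, List.filter_cons, hxb]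
      rw [hfilt]
      have hback : v ++ [x] ++ u'.filter (fun z => z.2 != p) =
          v ++ (x :: u').filter (fun z => z.2 != p) := by
        rw [List.filter_cons_of_pos (by simpa using hx)]
        simp
      rw [hback]

-- a filtered range read from its last element
theorem filter_range_last (a b j : Int) (P : Int → Bool) (L : List Int)
    (h : (PySem.List.pyRange a b 1).filter P = L ++ [j]) :
    a ≤ j ∧ j < b ∧ P j = true ∧ L = (PySem.List.pyRange a j 1).filter P ∧
      (PySem.List.pyRange (j + 1) b 1).filter P = [] := by
  have hjmem : j ∈ (PySem.List.pyRange a b 1).filter P := by rw [h]; simp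
  have hjr : j ∈ PySem.List.pyRange a b 1 := List.mem_of_mem_filter hjmem
  have hPj : P j = true := List.of_mem_filter hjmem
  obtain ⟨haj, hjb⟩ := (PySem.List.mem_pyRange_one).mp hjr
  have hsplit : PySem.List.pyRange a b 1 =
      (PySem.List.pyRange a j 1 ++ [j]) ++ PySem.List.pyRange (j + 1) b 1 := by
    rw [← PySem.List.pyRange_one_succ_right haj]
    exact PySem.List.pyRange_one_append a (j + 1) b (by omega) (by omega)
  rw [hsplit, List.filter_append, List.filter_append] at h
  have hfj : List.filter P [j] = [j] := by simp [hPj]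
  rw [hfj] at h
  have hF2 : (PySem.List.pyRange (j + 1) b 1).filter P = [] := by
    cases hc : (PySem.List.pyRange (j + 1) b 1).filter P with
    | nil => rfl
    | cons y t =>
      exfalso
      rw [hc] at h
      have h1 : ((PySem.List.pyRange a j 1).filter P ++ [j] ++ (y :: t)).getLast? =
          (L ++ [j]).getLast? := by rw [h]
      rw [List.getLast?_append, List.getLast?_append] at h1
      have h2 : (y :: t).getLast? = some j := by
        cases hgl : (y :: t).getLast? with
        | none => simp at hgl
        | some z => rw [hgl] at h1; simpa using h1
      have h3 : j ∈ (y :: t) := List.mem_of_getLast? h2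
      have h5 : j ∈ PySem.List.pyRange (j + 1) b 1 := List.mem_of_mem_filter (hc ▸ h3)
      have := (PySem.List.mem_pyRange_one).mp h5
      omega
  rw [hF2, List.append_nil] at h
  have hL : L = (PySem.List.pyRange a j 1).filter P := by
    have := congrArg List.dropLast h
    simpa using this.symm
  exact ⟨haj, hjb, hPj, hL, hF2⟩

theorem blk_split (ps : List Int) (a m b : Int) (lv : List Int) (h1 : a ≤ m) (h2 : m ≤ b) :
    blk ps a b lv = blk ps a m lv ++ blk ps m b lv := by
  rw [blk, PySem.List.pyRange_one_append a m b h1 h2, List.filter_append, List.map_append]; rfl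

theorem blk_singleton (ps : List Int) (j : Int) (lv : List Int)
    (h : PySem.List.pyGetD ps j 0 ∈ lv) :
    blk ps j (j + 1) lv = [(j, PySem.List.pyGetD ps j 0)] := by
  rw [blk, PySem.List.pyRange_one_singleton]
  simp [h]

theorem blk_empty_single (ps : List Int) (j : Int) (lv : List Int)
    (h : PySem.List.pyGetD ps j 0 ∉ lv) :
    blk ps j (j + 1) lv = [] := by
  rw [blk, PySem.List.pyRange_one_singleton]
  simp [h]

theorem tags_blk (ps : List Int) (a b : Int) (lv : List Int) :
    (blk ps a b lv).map Prod.fst =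
      (PySem.List.pyRange a b 1).filter (fun i => decide (PySem.List.pyGetD ps i 0 ∈ lv)) := by
  rw [blk, List.map_map]
  simp [Function.comp_def]

theorem filter_blk (ps : List Int) (a b p : Int) (lv : List Int) (hp : p ∈ lv) :
    (blk ps a b lv).filter (fun x => x.2 == p) =
      ((PySem.List.pyRange a b 1).filter (fun i => PySem.List.pyGetD ps i 0 == p)).map
        (fun i => (i, PySem.List.pyGetD ps i 0)) := by
  rw [blk, List.filter_map, List.filter_filter]
  congr 1
  apply List.filter_congr
  intro i _
  by_cases h : PySem.List.pyGetD ps i 0 = p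
  · simp [h, hp]
  · simp [h]

theorem filterout_blk (ps : List Int) (a b p : Int) (rest : List Int) (hp : p ∉ rest) :
    (blk ps a b (p :: rest)).filter (fun x => x.2 != p) = blk ps a b rest := by
  rw [blk, blk, List.filter_map, List.filter_filter]
  congr 1
  apply List.filter_congr
  intro i _
  by_cases h : PySem.List.pyGetD ps i 0 = p
  · simp [h, hp]
  · simp [h]

theorem blk_congr_no_p (ps : List Int) (a b p : Int) (rest : List Int)
    (h : (PySem.List.pyRange a b 1).filter (fun i => PySem.List.pyGetD ps i 0 == p) = []) :
    blk ps a b (p :: rest) = blk ps a b rest := by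
  rw [blk, blk]
  congr 1
  apply List.filter_congr
  intro i hi
  have hne : PySem.List.pyGetD ps i 0 ≠ p := by
    intro hEq
    have : i ∈ (PySem.List.pyRange a b 1).filter (fun i => PySem.List.pyGetD ps i 0 == p) :=
      List.mem_filter.mpr ⟨hi, by simp [hEq]⟩
    rw [h] at this; exact absurd this (by simp)
  simp [hne]
theorem blk_no_p (ps : List Int) (a b p : Int) (lv : List Int)
    (h : (PySem.List.pyRange a b 1).filter (fun i => PySem.List.pyGetD ps i 0 == p) = []) :
    ∀ x ∈ blk ps a b lv, x.2 ≠ p := by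
  intro x hx
  rw [blk] at hx
  obtain ⟨i, hi, rfl⟩ := List.mem_map.mp hx
  have hir := List.mem_of_mem_filter hi
  intro hEq
  simp only at hEq
  have hmem : i ∈ (PySem.List.pyRange a b 1).filter
      (fun i => PySem.List.pyGetD ps i 0 == p) :=
    List.mem_filter.mpr ⟨hir, by simp [hEq]⟩
  rw [h] at hmem
  exact absurd hmem (by simp)

theorem canonQ_le (ps : List Int) (f p : Int) (rest : List Int)
    (hrest : ∀ q ∈ rest, q < p) : ∀ x ∈ canonQ ps f (p :: rest), x.2 ≤ p := by
  intro x hx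
  rcases List.mem_append.mp hx with hx' | hx' <;>
  · rw [blk] at hx'
    obtain ⟨i, hi, rfl⟩ := List.mem_map.mp hx'
    have := List.of_mem_filter hi
    simp only [decide_eq_true_eq] at this
    rcases List.mem_cons.mp this with h' | h'
    · exact le_of_eq h'
    · exact le_of_lt (hrest _ h')

theorem tags_canonQ_nodup (ps : List Int) (f : Int) (lv : List Int) :
    ((canonQ ps f lv).map Prod.fst).Nodup := by
  rw [canonQ, List.map_append, tags_blk, tags_blk]
  apply List.Nodup.append
  · exact (PySem.List.nodup_pyRange_one _ _).filter _
  · exact (PySem.List.nodup_pyRange_one _ _).filter _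
  · intro i hi1 hi2
    have h1 := (PySem.List.mem_pyRange_one).mp (List.mem_of_mem_filter hi1)
    have h2 := (PySem.List.mem_pyRange_one).mp (List.mem_of_mem_filter hi2)
    omega

theorem mem_tags_canonQ (ps : List Int) (f loc : Int) (lv : List Int)
    (h0 : 0 ≤ loc) (hn : loc < (ps.length : Int)) (hf0 : 0 ≤ f) (hfn : f ≤ (ps.length : Int))
    (hmem : PySem.List.pyGetD ps loc 0 ∈ lv) :
    loc ∈ (canonQ ps f lv).map Prod.fst := by
  rw [canonQ, List.map_append, tags_blk, tags_blk, List.mem_append]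
  by_cases hfl : f ≤ loc
  · exact Or.inl (List.mem_filter.mpr ⟨PySem.List.mem_pyRange_one.mpr ⟨hfl, hn⟩, by simp [hmem]⟩)
  · exact Or.inr (List.mem_filter.mpr ⟨PySem.List.mem_pyRange_one.mpr ⟨h0, by omega⟩, by simp [hmem]⟩)

theorem tags_filter_canonQ (ps : List Int) (f p : Int) (lv : List Int) (hp : p ∈ lv) :
    ((canonQ ps f lv).filter (fun x => x.2 == p)).map Prod.fst =
      (PySem.List.pyRange f (ps.length) 1).filter (fun i => PySem.List.pyGetD ps i 0 == p)
      ++ (PySem.List.pyRange 0 f 1).filter (fun i => PySem.List.pyGetD ps i 0 == p) := by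
  rw [canonQ, List.filter_append, filter_blk _ _ _ _ _ hp, filter_blk _ _ _ _ _ hp,
    List.map_append, List.map_map, List.map_map]
  simp [Function.comp_def]

theorem core (ps : List Int) (lvls : List Int) :
    ∀ (f cnt loc : Int),
    lvls.Pairwise (· > ·) →
    (∀ p ∈ lvls, ∃ i : Int, 0 ≤ i ∧ i < (ps.length : Int) ∧ PySem.List.pyGetD ps i 0 = p) →
    0 ≤ f → f ≤ (ps.length : Int) →
    0 ≤ loc → loc < (ps.length : Int) → PySem.List.pyGetD ps loc 0 ∈ lvls →
    simGo (canonQ ps f lvls) loc cnt = altOuter lvls ps f loc cnt := by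
  induction lvls with
  | nil =>
    intro f cnt loc _ _ _ _ _ _ hmem
    exact absurd hmem (by simp)
  | cons p rest ih =>
    intro f cnt loc hpw hatt hf0 hfn hl0 hln hmem
    obtain ⟨hgt, hpw'⟩ := List.pairwise_cons.mp hpw
    have hpnr : p ∉ rest := fun h => lt_irrefl p (hgt p h)
    set n : Int := (ps.length : Int) with hn
    set O1 : List Int := (PySem.List.pyRange f n 1).filter
      (fun i => PySem.List.pyGetD ps i 0 == p) with hO1
    set O2 : List Int := (PySem.List.pyRange 0 f 1).filter
      (fun i => PySem.List.pyGetD ps i 0 == p) with hO2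
    have hlocO : PySem.List.pyGetD ps loc 0 = p → loc ∈ O1 ++ O2 := by
      intro hlp
      rw [List.mem_append, hO1, hO2]
      by_cases hlf : f ≤ loc
      · exact Or.inl (List.mem_filter.mpr ⟨PySem.List.mem_pyRange_one.mpr ⟨hlf, hln⟩, by simp [hlp]⟩)
      · exact Or.inr (List.mem_filter.mpr ⟨PySem.List.mem_pyRange_one.mpr ⟨hl0, by omega⟩, by simp [hlp]⟩)
    obtain ⟨w, hw0, hwn, hwp⟩ := hatt p (by simp)
    have hOrdne : O1 ++ O2 ≠ [] := by
      intro hnil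
      have hwmem : w ∈ O1 ++ O2 := by
        rw [List.mem_append, hO1, hO2]
        by_cases hwf : f ≤ w
        · exact Or.inl (List.mem_filter.mpr ⟨PySem.List.mem_pyRange_one.mpr ⟨hwf, hwn⟩, by simp [hwp]⟩)
        · exact Or.inr (List.mem_filter.mpr ⟨PySem.List.mem_pyRange_one.mpr ⟨hw0, by omega⟩, by simp [hwp]⟩)
      rw [hnil] at hwmem
      exact absurd hwmem (by simp)
    have halt : altOuter (p :: rest) ps f loc cnt =
        match altInner (O1 ++ O2) loc cnt with
        | Sum.inl r => r
        | Sum.inr cnt' => altOuter rest ps (((O1 ++ O2).getLast?.getD 0) + 1) loc cnt' := by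
      rw [altOuter]
    rw [halt]
    have hattr : ∀ q ∈ rest, ∃ i : Int, 0 ≤ i ∧ i < n ∧ PySem.List.pyGetD ps i 0 = q :=
      fun q hq => hatt q (List.mem_cons_of_mem p hq)
    rcases List.eq_nil_or_concat' O2 with hO2nil | ⟨L2, j, hO2c⟩
    · -- the last process of this level sits in [f, n)
      have hO1ne : O1 ≠ [] := by
        intro h1; rw [h1, hO2nil] at hOrdne; exact hOrdne rfl
      obtain ⟨L1, j, hO1c⟩ := (List.eq_nil_or_concat' O1).resolve_left hO1ne
      obtain ⟨hfj, hjn, hPj, hL1, hE1⟩ :=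
        filter_range_last f n j (fun i => PySem.List.pyGetD ps i 0 == p) L1 (by rw [← hO1, hO1c])
      have hprij : PySem.List.pyGetD ps j 0 = p := by simpa using hPj
      have hE2 : (PySem.List.pyRange 0 f 1).filter (fun i => PySem.List.pyGetD ps i 0 == p) = [] := by
        rw [← hO2, hO2nil]
      have hq : canonQ ps f (p :: rest) =
          blk ps f j (p :: rest) ++ (j, PySem.List.pyGetD ps j 0) ::
            (blk ps (j + 1) n (p :: rest) ++ blk ps 0 f (p :: rest)) := by
        rw [canonQ, blk_split ps f j n (p :: rest) hfj (by omega),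
          blk_split ps j (j + 1) n (p :: rest) (by omega) (by omega),
          blk_singleton ps j (p :: rest) (by rw [hprij]; simp)]
        simp [List.append_assoc]
      have hlvl := level_lemma p (blk ps f j (p :: rest)) (j, PySem.List.pyGetD ps j 0)
        (blk ps (j + 1) n (p :: rest) ++ blk ps 0 f (p :: rest)) loc cnt
        hprij
        (by intro x hx
            rcases List.mem_append.mp hx with hx' | hx'
            · exact blk_no_p ps (j + 1) n p (p :: rest) hE1 x hx'
            · exact blk_no_p ps 0 f p (p :: rest) hE2 x hx')
        (by rw [← hq]; exact canonQ_le ps f p rest hgt)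
        (by rw [← hq]; exact tags_canonQ_nodup ps f (p :: rest))
        (by rw [← hq]; exact mem_tags_canonQ ps f loc (p :: rest) hl0 hln hf0 hfn hmem)
      rw [← hq] at hlvl
      rw [hlvl]
      have hord : (((canonQ ps f (p :: rest)).filter (fun x => x.2 == p)).map Prod.fst) = O1 ++ O2 :=
        tags_filter_canonQ ps f p (p :: rest) (by simp)
      rw [hord]
      cases haI : altInner (O1 ++ O2) loc cnt with
      | inl r => rfl
      | inr c =>
        have hlast : (O1 ++ O2).getLast?.getD 0 = j := by
          rw [hO2nil, List.append_nil, hO1c, List.getLast?_concat]; rfl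
        have hafter : blk ps (j + 1) n (p :: rest) ++ blk ps 0 f (p :: rest) ++
            (blk ps f j (p :: rest)).filter (fun x => x.2 != p) = canonQ ps (j + 1) rest := by
          rw [filterout_blk ps f j p rest hpnr,
            blk_congr_no_p ps (j + 1) n p rest hE1,
            blk_congr_no_p ps 0 f p rest hE2,
            canonQ, blk_split ps 0 f (j + 1) rest hf0 (by omega),
            blk_split ps f j (j + 1) rest hfj (by omega),
            blk_empty_single ps j rest (by rw [hprij]; exact hpnr)]
          simp [List.append_assoc, hn]
        have hmemr : PySem.List.pyGetD ps loc 0 ∈ rest := by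
          have hnotin := altInner_inr _ _ _ _ haI
          rcases List.mem_cons.mp hmem with h' | h'
          · exact absurd (hlocO h') hnotin
          · exact h'
        rw [hafter, hlast]
        exact ih (j + 1) c loc hpw' hattr (by omega) (by omega) hl0 hln hmemr
    · -- the last process of this level sits in [0, f)
      obtain ⟨hj0, hjf, hPj, hL2, hE2⟩ :=
        filter_range_last 0 f j (fun i => PySem.List.pyGetD ps i 0 == p) L2 (by rw [← hO2, hO2c])
      have hprij : PySem.List.pyGetD ps j 0 = p := by simpa using hPj
      have hq : canonQ ps f (p :: rest) =
          (blk ps f n (p :: rest) ++ blk ps 0 j (p :: rest)) ++ (j, PySem.List.pyGetD ps j 0) ::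
            blk ps (j + 1) f (p :: rest) := by
        rw [canonQ, blk_split ps 0 j f (p :: rest) hj0 (by omega),
          blk_split ps j (j + 1) f (p :: rest) (by omega) (by omega),
          blk_singleton ps j (p :: rest) (by rw [hprij]; simp)]
        simp [List.append_assoc, hn]
      have hlvl := level_lemma p (blk ps f n (p :: rest) ++ blk ps 0 j (p :: rest))
        (j, PySem.List.pyGetD ps j 0) (blk ps (j + 1) f (p :: rest)) loc cnt
        hprij
        (fun x hx => blk_no_p ps (j + 1) f p (p :: rest) hE2 x hx)
        (by rw [← hq]; exact canonQ_le ps f p rest hgt)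
        (by rw [← hq]; exact tags_canonQ_nodup ps f (p :: rest))
        (by rw [← hq]; exact mem_tags_canonQ ps f loc (p :: rest) hl0 hln hf0 hfn hmem)
      rw [← hq] at hlvl
      rw [hlvl]
      have hord : (((canonQ ps f (p :: rest)).filter (fun x => x.2 == p)).map Prod.fst) = O1 ++ O2 :=
        tags_filter_canonQ ps f p (p :: rest) (by simp)
      rw [hord]
      cases haI : altInner (O1 ++ O2) loc cnt with
      | inl r => rfl
      | inr c =>
        have hlast : (O1 ++ O2).getLast?.getD 0 = j := by
          rw [List.getLast?_append, hO2c, List.getLast?_concat]; rfl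
        have hafter : blk ps (j + 1) f (p :: rest) ++
            ((blk ps f n (p :: rest) ++ blk ps 0 j (p :: rest)).filter (fun x => x.2 != p)) =
            canonQ ps (j + 1) rest := by
          rw [List.filter_append, filterout_blk ps f n p rest hpnr,
            filterout_blk ps 0 j p rest hpnr,
            blk_congr_no_p ps (j + 1) f p rest hE2,
            canonQ, blk_split ps (j + 1) f n rest (by omega) hfn,
            blk_split ps 0 j (j + 1) rest hj0 (by omega),
            blk_empty_single ps j rest (by rw [hprij]; exact hpnr)]
          simp [List.append_assoc, hn]
        have hmemr : PySem.List.pyGetD ps loc 0 ∈ rest := by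
          have hnotin := altInner_inr _ _ _ _ haI
          rcases List.mem_cons.mp hmem with h' | h'
          · exact absurd (hlocO h') hnotin
          · exact h'
        rw [hafter, hlast]
        exact ih (j + 1) c loc hpw' hattr (by omega) (by omega) hl0 hln hmemr

theorem zip_eq_map (ps : List Int) :
    (PySem.List.pyRange 0 (ps.length) 1).zip ps =
      (PySem.List.pyRange 0 (ps.length) 1).map (fun i => (i, PySem.List.pyGetD ps i 0)) := by
  apply List.ext_getElem
  · simp [PySem.List.length_pyRange_one]
  · intro k h1 h2
    simp only [List.getElem_zip, List.getElem_map]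
    rw [PySem.List.getElem_pyRange_one]
    have hk : k < ps.length := by
      simpa [PySem.List.length_pyRange_one] using h2
    have : PySem.List.pyGetD ps (0 + (k : Int)) 0 = ps[k] := by
      rw [zero_add, PySem.List.pyGetD_natCast, List.getD_eq_getElem?_getD, List.getElem?_eq_getElem hk]
      rfl
    rw [this]

theorem canonQ_init (ps : List Int) :
    canonQ ps 0 (PySem.List.sorted (PySem.Set.ofList ps) (fun x => x) true) =
      (PySem.List.pyRange 0 (ps.length) 1).map (fun i => (i, PySem.List.pyGetD ps i 0)) := by
  rw [canonQ, blk, blk]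
  have h0 : PySem.List.pyRange 0 0 1 = [] := PySem.List.pyRange_one_eq_nil le_rfl
  rw [h0]
  have hall : (PySem.List.pyRange 0 (ps.length) 1).filter
      (fun i => decide (PySem.List.pyGetD ps i 0 ∈
        PySem.List.sorted (PySem.Set.ofList ps) (fun x => x) true)) =
      PySem.List.pyRange 0 (ps.length) 1 := by
    apply List.filter_eq_self.mpr
    intro i hi
    have hb := (PySem.List.mem_pyRange_one).mp hi
    have hmem : PySem.List.pyGetD ps i 0 ∈ ps := by
      apply PySem.List.pyGetD_mem
      unfold PySem.Raise.InRange
      omega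
    simp [PySem.List.mem_sorted, PySem.Set.mem_ofList, hmem]
  rw [hall]
  simp

theorem sorted_desc_pairwise_gt (ps : List Int) :
    (PySem.List.sorted (PySem.Set.ofList ps) (fun x => x) true).Pairwise (· > ·) := by
  have h1 := PySem.List.sorted_pairwise_rev (PySem.Set.ofList ps) (fun x => x)
  have h2 : (PySem.List.sorted (PySem.Set.ofList ps) (fun x => x) true).Nodup :=
    (PySem.List.sorted_perm _ _ _).nodup_iff.mpr (PySem.Set.nodup_ofList ps)
  have h3 := List.Pairwise.and h1 h2
  exact h3.imp (fun {a b} hab => lt_of_le_of_ne hab.1 (Ne.symm hab.2))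

-- ===== VERDICT (by name: the statement is the Claim_ definition above) =====
theorem solution_spec : Claim_equal_solution := by
  intro priorities location _
  show solution priorities location = solution_alt priorities location
  by_cases hv : 0 ≤ location ∧ location < (priorities.length : Int)
  · rw [solution, solGo_eq_simGo _ _ _ _ (by simp [PySem.List.length_pyRange_one]),
      zip_eq_map, ← canonQ_init, solution_alt, if_pos hv]
    apply core
    · exact sorted_desc_pairwise_gt priorities
    · intro p hp
      have hmem : p ∈ priorities := by
        rw [PySem.List.mem_sorted, PySem.Set.mem_ofList] at hp
        exact hp
      obtain ⟨k, hk, hkp⟩ := List.mem_iff_getElem.mp hmem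
      refine ⟨(k : Int), by omega, by omega, ?_⟩
      rw [PySem.List.pyGetD_natCast, List.getD_eq_getElem?_getD, List.getElem?_eq_getElem hk]
      exact hkp
    · omega
    · omega
    · exact hv.1
    · exact hv.2
    · rw [PySem.List.mem_sorted, PySem.Set.mem_ofList]
      apply PySem.List.pyGetD_mem
      unfold PySem.Raise.InRange
      omega
  · rw [solution_alt, if_neg hv, solution]
    cases priorities with
    | nil => rw [solGo]
    | cons p pr =>
      have hlen : (0 : Int) < ((p :: pr).length : Int) := by simp
      rw [PySem.List.pyRange_one_cons hlen, solGo, if_pos]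
      intro hm
      rcases List.mem_cons.mp hm with h' | h'
      · apply hv; constructor <;> omega
      · have := (PySem.List.mem_pyRange_one).mp h'
        apply hv; constructor <;> omega
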